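-- pv_equiv track=rewrite | github.com/rossvalera/inf1340_2015_asst2 | exercise2.py | find
-- ===== SOURCE A (Python) =====
-- def find(input_string, substring, start, end):
--     """
--     This function will responsible for finding the first instance of a substring within a string in a certain range
--     :param input_string: Any length of characters
--     :param substring: Characters that are being searched for
--     :param start: Start of the range being looked at in the input_string
--     :param end: End of the range being looked at in the input_string
--     :return: The first location of the substring within the input_string or an error if it doesnt exist
--     """
--     # Define variables that will be used
--
--     index = 0
--     string_function = input_string[start:end]
--
--     # Code to start checking each letter in given phrase until given word is found
--     for ch in string_function:
--         if ch == substring[0]: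
--             if string_function[index: index+len(substring)] == substring:
--                 return index
--         index += 1
--     # Given word is not in the range of the given phrase, error is given
--     return - 1
-- ===== SOURCE B (Python) =====
-- def find(input_string, substring, start, end):
--     return input_string[start:end].find(substring)
-- ===== Notes on version B (the rewrite author's own statement) =====
-- stated objective: idiomatic
-- what changed: B replaces A's hand-written scan (first-char check plus a fresh length-m slice comparison at every position) with the standard-library str.find on the slice, which does the whole search in one C-implemented call.
-- outside the precondition, e.g. on find('', '', 0, 0): A returns -1, B returns 0; on find('ab', '', 5, 9): A returns -1, B returns 0
import Mathlib
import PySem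

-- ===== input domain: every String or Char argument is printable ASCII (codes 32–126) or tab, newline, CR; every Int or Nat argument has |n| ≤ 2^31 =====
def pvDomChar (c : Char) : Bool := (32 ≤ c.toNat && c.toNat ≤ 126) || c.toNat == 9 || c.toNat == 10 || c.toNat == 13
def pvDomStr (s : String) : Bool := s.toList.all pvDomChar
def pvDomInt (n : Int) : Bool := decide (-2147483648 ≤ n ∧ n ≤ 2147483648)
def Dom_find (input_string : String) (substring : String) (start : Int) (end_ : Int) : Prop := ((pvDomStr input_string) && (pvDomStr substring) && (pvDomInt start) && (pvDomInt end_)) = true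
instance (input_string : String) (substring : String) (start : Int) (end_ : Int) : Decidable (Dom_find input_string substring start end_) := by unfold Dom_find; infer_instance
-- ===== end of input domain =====

-- B replaces A's hand-written scan with the standard-library find on the slice (objective: idiomatic).

-- ===== PORT A =====
-- A's loop: for ch in string_function with a running index; first-char check, then a slice comparison.
def findLoopA (sf : List Char) (sub : List Char) : Nat → List Char → Int
  | _, [] => -1
  | idx, ch :: rest =>
      if PySem.List.pyGet? sub 0 = some ch then
        if PySem.List.slice sf (some (idx : Int)) (some ((idx : Int) + (sub.length : Int))) = sub then (idx : Int)
        else findLoopA sf sub (idx + 1) rest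
      else findLoopA sf sub (idx + 1) rest

def find (input_string : String) (substring : String) (start : Int) (end_ : Int) : Int :=
  let string_function := PySem.List.slice input_string.toList (some start) (some end_)
  findLoopA string_function substring.toList 0 string_function

-- ===== PORT B =====
-- Source B: return input_string[start:end].find(substring)
def find_alt (input_string : String) (substring : String) (start : Int) (end_ : Int) : Int :=
  PySem.Chars.find (PySem.List.slice input_string.toList (some start) (some end_)) substring.toList

-- ===== PRECONDITION & SPEC =====
-- Pre_ excludes the empty substring: there A raises IndexError on substring[0] whenever the slice is
-- non-empty, and on an empty slice A's -1 is an accident of the never-entered loop, while B follows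
-- Python's find convention (empty string found at 0).
def Pre_find (input_string : String) (substring : String) (start : Int) (end_ : Int) : Prop := substring ≠ ""
instance (input_string : String) (substring : String) (start : Int) (end_ : Int) : Decidable (Pre_find input_string substring start end_) := by unfold Pre_find; infer_instance
def pvWitness_find : String × String × Int × Int := ("abcabc", "ca", 1, 6)

def Spec_find (input_string : String) (substring : String) (start : Int) (end_ : Int) (out : Int) : Prop := out = find_alt input_string substring start end_
instance (input_string : String) (substring : String) (start : Int) (end_ : Int) (out : Int) : Decidable (Spec_find input_string substring start end_ out) := by unfold Spec_find; infer_instance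

-- ===== CLAIM (what is proved, stated in full; the proofs are below) =====
def Claim_equal_find : Prop := ∀ (input_string : String) (substring : String) (start : Int) (end_ : Int), Dom_find input_string substring start end_ → Pre_find input_string substring start end_ → Spec_find input_string substring start end_ (find input_string substring start end_)

-- ===== LEMMAS AND PROOFS =====

-- A's slice comparison at position idx says exactly "sub is a prefix of sf.drop idx".
lemma sliceA_eq_iff (sf sub : List Char) (idx : Nat) :
    PySem.List.slice sf (some (idx : Int)) (some ((idx : Int) + (sub.length : Int))) = sub ↔
      sub <+: sf.drop idx := by
  rw [PySem.List.slice_natCast_add]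
  constructor
  · intro h; exact h ▸ List.take_prefix _ _
  · intro h; exact (List.prefix_iff_eq_take.mp h).symm

-- If no occurrence at or after idx, A's loop returns -1.
lemma findLoopA_none (sf sub : List Char) :
    ∀ rest idx, rest = sf.drop idx → (∀ j, idx ≤ j → ¬ sub <+: sf.drop j) →
      findLoopA sf sub idx rest = -1 := by
  intro rest
  induction rest with
  | nil => intro idx _ _; rfl
  | cons ch rest ih =>
      intro idx hdrop hno
      have hrest : rest = sf.drop (idx + 1) := by
        have := congrArg List.tail hdrop
        simpa [List.tail_drop] using this
      have hnoP : ¬ PySem.List.slice sf (some (idx : Int)) (some ((idx : Int) + (sub.length : Int))) = sub := by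
        rw [sliceA_eq_iff]; exact hno idx le_rfl
      have hrec := ih (idx + 1) hrest (fun j hj => hno j (by omega))
      unfold findLoopA
      by_cases h1 : PySem.List.pyGet? sub 0 = some ch
      · rw [if_pos h1, if_neg hnoP]; exact hrec
      · rw [if_neg h1]; exact hrec

-- If j is the first occurrence at or after idx, A's loop returns j.
lemma findLoopA_first (sf sub : List Char) (hsub : sub ≠ []) :
    ∀ rest idx j, rest = sf.drop idx → idx ≤ j → sub <+: sf.drop j →
      (∀ i, idx ≤ i → i < j → ¬ sub <+: sf.drop i) →
      findLoopA sf sub idx rest = (j : Int) := by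
  intro rest
  induction rest with
  | nil =>
      intro idx j hdrop _ hj _
      exfalso
      have hlen : sf.length ≤ idx := by
        have := congrArg List.length hdrop
        simp [List.length_drop] at this
        omega
      have : sf.drop j = [] := List.drop_eq_nil_of_le (by omega)
      rw [this] at hj
      exact hsub (List.prefix_nil.mp hj)
  | cons ch rest ih =>
      intro idx j hdrop hij hj hmin
      have hrest : rest = sf.drop (idx + 1) := by
        have := congrArg List.tail hdrop
        simpa [List.tail_drop] using this
      by_cases heq : idx = j
      · -- occurrence right here: both guards pass
        subst heq
        obtain ⟨c0, subt, rfl⟩ := List.exists_cons_of_ne_nil hsub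
        have hch : c0 = ch := by
          obtain ⟨t, ht⟩ := hj
          rw [← hdrop] at ht
          exact (List.cons_eq_cons.mp ht).1
        unfold findLoopA
        rw [if_pos (by simp [PySem.List.pyGet?, PySem.List.pyIdx?, hch]),
            if_pos ((sliceA_eq_iff sf _ idx).mpr hj)]
      · -- no occurrence here: recurse
        have hlt : idx < j := lt_of_le_of_ne hij heq
        have hnohere : ¬ sub <+: sf.drop idx := hmin idx le_rfl hlt
        have hrec := ih (idx + 1) j hrest (by omega) hj (fun i hi hij' => hmin i (by omega) hij')
        have hnoP : ¬ PySem.List.slice sf (some (idx : Int)) (some ((idx : Int) + (sub.length : Int))) = sub := by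
          rw [sliceA_eq_iff]; exact hnohere
        unfold findLoopA
        by_cases h1 : PySem.List.pyGet? sub 0 = some ch
        · rw [if_pos h1, if_neg hnoP]; exact hrec
        · rw [if_neg h1]; exact hrec

-- A's whole loop computes Chars.find.
lemma findLoopA_eq_find (sf sub : List Char) (hsub : sub ≠ []) :
    findLoopA sf sub 0 sf = PySem.Chars.find sf sub := by
  by_cases h : PySem.Chars.find sf sub = -1
  · rw [h]
    have hni : ¬ sub <:+: sf := (PySem.Chars.find_eq_neg_one_iff sf sub).mp h
    refine findLoopA_none sf sub sf 0 (by simp) ?_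
    intro j _ hpre
    exact hni (hpre.isInfix.trans (List.drop_suffix j sf).isInfix)
  · have hnn : 0 ≤ PySem.Chars.find sf sub := by
      have := PySem.Chars.neg_one_le_find (s := sf) (sub := sub)
      omega
    obtain ⟨hpre, hmin⟩ := PySem.Chars.find_spec (s := sf) (sub := sub) hnn
    have := findLoopA_first sf sub hsub sf 0 (PySem.Chars.find sf sub).toNat (by simp)
      (Nat.zero_le _) hpre (fun i _ hi => hmin i hi)
    rw [this, Int.toNat_of_nonneg hnn]

-- ===== VERDICT (by name: the statement is the Claim_ definition above) =====
theorem find_spec : Claim_equal_find := by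
  intro input_string substring start end_ _ hpre
  unfold Spec_find find find_alt
  refine findLoopA_eq_find _ _ ?_
  intro hn; exact hpre (String.toList_inj.mp (by simp [hn]))
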